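-- pv_equiv track=rewrite | github.com/nagshubhadip/bittu | time_to_meet.py | time_to_meet
-- ===== SOURCE A (Python) =====
-- def time_to_meet(car1, car2):
--
-- 	#if the starting position of cars are same, then at time = 0, they are at the same position
-- 	if(car1[2] == car2[2]):
-- 		return 0
--
-- 	#if both the cars' speed is same but starting position is different then they will never catch up, so return -1
-- 	if(car1[1] == car2[1] and car1[2] != car2[2]):
-- 		return -1
--
-- 	#if the spped of car1 is < speed of car2 and starting pos of car1 < starting pos of car2
-- 	#then in every second, the distance b/w car1 and car2 will increase and they will never catch up
-- 	elif(car1[1] < car2[1] and car1[2] < car2[2]):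
-- 		return -1
--
-- 	#if the spped of car1 is > speed of car2 and starting pos of car1 > starting pos of car2
-- 	#then in every second, the distance b/w car1 and car2 will increase and they will never catch up
-- 	elif(car1[1] > car2[1] and car1[2] > car2[2]):
-- 		return -1
-- 	sec = 0
-- 	x = car1[2] #x stores the position of car1
-- 	y = car2[2] #y stores the position of car2
-- 	#infinite loop
-- 	while(True):
-- 		sec += 1
-- 		#calculating position of each car in every second
-- 		x = x + car1[1]
-- 		y = y + car2[1]
--
-- 		#if the starting position of car1 < starting position of car2 and x certainly becomes >= y
-- 		#or if the starting position of car1 > starting position of car2 and x certainly becomes <= y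
-- 		#that implies, they have catched up each other
-- 		if((car1[2] < car2[2] and x >= y) or (car1[2] > car2[2] and x <= y)):
-- 			return sec
-- ===== SOURCE B (Python) =====
-- def time_to_meet(car1, car2):
--     gap = abs(car1[2] - car2[2])
--     if gap == 0:
--         return 0
--     close = car1[1] - car2[1] if car2[2] > car1[2] else car2[1] - car1[1]
--     if close <= 0:
--         return -1
--     return -(-gap // close)
-- ===== Notes on version B (the rewrite author's own statement) =====
-- stated objective: simpler
-- what changed: Replaced the second-by-second simulation loop with a closed-form ceiling division ceil(gap/closing_speed); the four early-return cases collapse into one sign test on the closing speed.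
import Mathlib
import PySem

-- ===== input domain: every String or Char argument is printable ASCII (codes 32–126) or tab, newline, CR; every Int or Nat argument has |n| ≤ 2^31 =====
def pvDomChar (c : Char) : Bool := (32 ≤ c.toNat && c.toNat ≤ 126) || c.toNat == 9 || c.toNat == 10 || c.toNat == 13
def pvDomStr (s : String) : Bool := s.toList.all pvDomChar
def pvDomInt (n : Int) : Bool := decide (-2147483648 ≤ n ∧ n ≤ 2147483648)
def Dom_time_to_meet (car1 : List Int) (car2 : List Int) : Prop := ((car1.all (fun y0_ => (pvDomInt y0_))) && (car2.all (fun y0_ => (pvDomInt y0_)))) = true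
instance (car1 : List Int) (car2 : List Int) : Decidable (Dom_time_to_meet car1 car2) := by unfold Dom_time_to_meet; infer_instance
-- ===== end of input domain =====

-- B replaces A's second-by-second simulation loop with a closed-form ceiling division and collapses the case analysis (objective: simpler).


-- ===== PORT A =====
-- A's `while True` loop, carrying the same state (sec, x, y); the extra fuel argument
-- only makes the recursion total (it is never exhausted on inputs satisfying Pre_).
def timeLoop (s1 s2 p1 p2 : Int) : Nat → Int → Int → Int → Int
  | 0, _, _, _ => 0
  | fuel + 1, sec, x, y =>
    let sec := sec + 1
    let x := x + s1
    let y := y + s2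
    if (p1 < p2 ∧ x ≥ y) ∨ (p1 > p2 ∧ x ≤ y) then sec
    else timeLoop s1 s2 p1 p2 fuel sec x y

def time_to_meet (car1 : List Int) (car2 : List Int) : Int :=
  let p1 := PySem.List.pyGetD car1 2 0
  let p2 := PySem.List.pyGetD car2 2 0
  let s1 := PySem.List.pyGetD car1 1 0
  let s2 := PySem.List.pyGetD car2 1 0
  if p1 = p2 then 0
  else if s1 = s2 ∧ p1 ≠ p2 then -1
  else if s1 < s2 ∧ p1 < p2 then -1
  else if s1 > s2 ∧ p1 > p2 then -1
  else timeLoop s1 s2 p1 p2 ((p1 - p2).natAbs + 1) 0 p1 p2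

-- ===== PORT B =====
def time_to_meet_alt (car1 : List Int) (car2 : List Int) : Int :=
  let gap := |PySem.List.pyGetD car1 2 0 - PySem.List.pyGetD car2 2 0|
  if gap = 0 then 0
  else
    let close := if PySem.List.pyGetD car2 2 0 > PySem.List.pyGetD car1 2 0
                 then PySem.List.pyGetD car1 1 0 - PySem.List.pyGetD car2 1 0
                 else PySem.List.pyGetD car2 1 0 - PySem.List.pyGetD car1 1 0
    if close ≤ 0 then -1
    else -(PySem.Int.floordiv (-gap) close)

-- ===== PRECONDITION & SPEC =====
-- Pre_ excludes only lists shorter than 3, on which A raises IndexError at car?[2] or car?[1].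
def Pre_time_to_meet (car1 : List Int) (car2 : List Int) : Prop :=
  3 ≤ car1.length ∧ 3 ≤ car2.length
instance (car1 : List Int) (car2 : List Int) : Decidable (Pre_time_to_meet car1 car2) := by
  unfold Pre_time_to_meet; infer_instance
def pvWitness_time_to_meet : List Int × List Int := ([1, 3, 0], [2, 1, 10])

def Spec_time_to_meet (car1 : List Int) (car2 : List Int) (out : Int) : Prop := out = time_to_meet_alt car1 car2
instance (car1 : List Int) (car2 : List Int) (out : Int) : Decidable (Spec_time_to_meet car1 car2 out) := by unfold Spec_time_to_meet; infer_instance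

-- ===== CLAIM (what is proved, stated in full; the proofs are below) =====
def Claim_equal_time_to_meet : Prop := ∀ (car1 : List Int) (car2 : List Int), Dom_time_to_meet car1 car2 → Pre_time_to_meet car1 car2 → Spec_time_to_meet car1 car2 (time_to_meet car1 car2)

-- ===== LEMMAS AND PROOFS =====

-- The loop is symmetric under swapping the two cars.
lemma timeLoop_swap (s1 s2 p1 p2 : Int) :
    ∀ (fuel : Nat) (sec x y : Int),
      timeLoop s1 s2 p1 p2 fuel sec x y = timeLoop s2 s1 p2 p1 fuel sec y x := by
  intro fuel
  induction fuel with
  | zero => intro sec x y; rfl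
  | succ n ih =>
    intro sec x y
    simp only [timeLoop]
    by_cases h : (p1 < p2 ∧ x + s1 ≥ y + s2) ∨ (p1 > p2 ∧ x + s1 ≤ y + s2)
    · rw [if_pos h, if_pos (by tauto)]
    · rw [if_neg h, if_neg (by tauto), ih]

-- In the region p1 < p2 (chaser behind), the loop returns sec + q where q is the unique
-- integer with (q-1)*c < gap ≤ q*c, c = s1 - s2 > 0 the closing speed.
lemma timeLoop_lt (s1 s2 p1 p2 : Int) (h12 : p1 < p2) :
    ∀ (fuel : Nat) (sec x y q : Int), 1 ≤ q → q.toNat ≤ fuel →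
      (q - 1) * (s1 - s2) < y - x → y - x ≤ q * (s1 - s2) →
      timeLoop s1 s2 p1 p2 fuel sec x y = sec + q := by
  intro fuel
  induction fuel with
  | zero => intro sec x y q hq hf _ _; omega
  | succ n ih =>
    intro sec x y q hq hf hlo hhi
    have hc : 0 < s1 - s2 := by
      rcases lt_trichotomy (s1 - s2) 0 with h | h | h
      · nlinarith
      · nlinarith
      · exact h
    simp only [timeLoop]
    by_cases hstop : y - x ≤ s1 - s2
    · have hq1 : q = 1 := by nlinarith
      rw [if_pos (Or.inl ⟨h12, by omega⟩)]
      omega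
    · rw [if_neg (by omega)]
      have := ih (sec + 1) (x + s1) (y + s2) (q - 1)
        (by nlinarith) (by omega)
        (by have : (q - 1 - 1) * (s1 - s2) = (q - 1) * (s1 - s2) - (s1 - s2) := by ring
            linarith)
        (by have : (q - 1) * (s1 - s2) = q * (s1 - s2) - (s1 - s2) := by ring
            linarith)
      rw [this]; ring

-- ceiling division -((-g) // c) satisfies the bracket characterisation
lemma ceil_bracket (g c : Int) (hc : 0 < c) (hg : 0 < g) :
    1 ≤ -(PySem.Int.floordiv (-g) c) ∧
    (-(PySem.Int.floordiv (-g) c) - 1) * c < g ∧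
    g ≤ -(PySem.Int.floordiv (-g) c) * c := by
  set q := -(PySem.Int.floordiv (-g) c) with hqdef
  have hbr : (q - 1) * c < g ∧ g ≤ q * c :=
    (PySem.Int.neg_floordiv_neg_eq_iff_of_pos hc).mp hqdef.symm
  refine ⟨?_, hbr.1, hbr.2⟩
  nlinarith [hbr.2]

-- q ≤ g when c ≥ 1 (for the fuel bound)
lemma ceil_le (g c q : Int) (hc : 0 < c) (hq : 1 ≤ q) (hlo : (q - 1) * c < g) : q ≤ g := by
  nlinarith

-- ===== VERDICT (by name: the statement is the Claim_ definition above) =====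
theorem time_to_meet_spec : Claim_equal_time_to_meet := by
  intro car1 car2 _ _
  unfold Spec_time_to_meet time_to_meet time_to_meet_alt
  set p1 := PySem.List.pyGetD car1 2 0 with hp1
  set p2 := PySem.List.pyGetD car2 2 0 with hp2
  set s1 := PySem.List.pyGetD car1 1 0 with hs1
  set s2 := PySem.List.pyGetD car2 1 0 with hs2
  by_cases hpp : p1 = p2
  · simp [hpp]
  · rw [if_neg hpp]
    by_cases hss : s1 = s2
    · rw [if_pos ⟨hss, hpp⟩]
      rcases lt_or_gt_of_ne hpp with h | h
      · rw [if_neg (by simp [abs_of_neg (by omega : p1 - p2 < 0)]; omega),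
            if_pos (by rw [if_pos h]; omega)]
      · rw [if_neg (by simp [abs_of_pos (by omega : 0 < p1 - p2)]; omega),
            if_pos (by rw [if_neg (by omega)]; omega)]
    · rw [if_neg (by tauto)]
      rcases lt_or_gt_of_ne hpp with hP | hP
      · -- p1 < p2: gap = p2 - p1 > 0, close = s1 - s2
        by_cases hS : s1 < s2
        · rw [if_pos ⟨hS, hP⟩,
              if_neg (by simp [abs_of_neg (by omega : p1 - p2 < 0)]; omega),
              if_pos (by rw [if_pos hP]; omega)]
        · have hS' : s2 < s1 := by omega
          rw [if_neg (by tauto), if_neg (by omega)]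
          have hg : (0:Int) < p2 - p1 := by omega
          have hc : (0:Int) < s1 - s2 := by omega
          obtain ⟨hq1, hlo, hhi⟩ := ceil_bracket (p2 - p1) (s1 - s2) hc hg
          rw [if_neg (by simp [abs_of_neg (by omega : p1 - p2 < 0)]; omega),
              if_neg (by rw [if_pos hP]; omega)]
          have habs : |p1 - p2| = p2 - p1 := abs_of_neg (by omega : p1 - p2 < 0) ▸ by ring_nf
          rw [if_pos hP]
          set q := -(PySem.Int.floordiv (-(p2 - p1)) (s1 - s2)) with hq
          have hle : q ≤ p2 - p1 := ceil_le _ _ _ hc hq1 hlo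
          have := timeLoop_lt s1 s2 p1 p2 hP ((p1 - p2).natAbs + 1) 0 p1 p2 q hq1
            (by omega) hlo hhi
          rw [this]
          have : |p1 - p2| = p2 - p1 := by rw [abs_of_neg (by omega : p1 - p2 < 0)]; ring
          rw [this]; omega
      · -- p1 > p2: gap = p1 - p2 > 0, close = s2 - s1
        by_cases hS : s1 > s2
        · rw [if_neg (by omega), if_pos ⟨hS, hP⟩,
              if_neg (by simp [abs_of_pos (by omega : 0 < p1 - p2)]; omega),
              if_pos (by rw [if_neg (by omega)]; omega)]
        · have hS' : s1 < s2 := by omega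
          rw [if_neg (by omega), if_neg (by omega)]
          have hg : (0:Int) < p1 - p2 := by omega
          have hc : (0:Int) < s2 - s1 := by omega
          obtain ⟨hq1, hlo, hhi⟩ := ceil_bracket (p1 - p2) (s2 - s1) hc hg
          rw [if_neg (by simp [abs_of_pos (by omega : 0 < p1 - p2)]; omega),
              if_neg (by rw [if_neg (by omega)]; omega)]
          rw [if_neg (by omega : ¬ p2 > p1)]
          set q := -(PySem.Int.floordiv (-(p1 - p2)) (s2 - s1)) with hq
          have hle : q ≤ p1 - p2 := ceil_le _ _ _ hc hq1 hlo
          rw [timeLoop_swap]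
          have := timeLoop_lt s2 s1 p2 p1 hP ((p1 - p2).natAbs + 1) 0 p2 p1 q hq1
            (by omega) hlo hhi
          rw [this]
          have : |p1 - p2| = p1 - p2 := abs_of_pos hg
          rw [this]; omega
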